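-- pv_equiv track=rewrite | github.com/pypi-data/pypi-mirror-400 | packages/urlfinderlib/urlfinderlib-0.19.0-py3-none-any.whl/urlfinderlib/finders/ical.py | _remove_lines_after_end
-- ===== SOURCE A (Python) =====
-- def _remove_lines_after_end(ical_text: str) -> str:
--     lines = ical_text.splitlines()
--     for i in range(len(lines) - 1, -1, -1):
--         if not lines[i].upper().startswith("END:"):
--             del lines[i]
--         else:
--             break
--
--     return "\n".join(lines)
-- ===== SOURCE B (Python) =====
-- def _remove_lines_after_end(ical_text: str) -> str:
--     lines = ical_text.splitlines()
--     last = -1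
--     for i, line in enumerate(lines):
--         if line.upper().startswith("END:"):
--             last = i
--     return "\n".join(lines[:last + 1])
-- ===== Notes on version B (the rewrite author's own statement) =====
-- stated objective: alternative
-- what changed: B replaces A's backward scan that deletes trailing lines in place (breaking at the first END:-prefixed line) with a single forward pass that records the index of the last END:-prefixed line and then slices the line list up to it.
import Mathlib
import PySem

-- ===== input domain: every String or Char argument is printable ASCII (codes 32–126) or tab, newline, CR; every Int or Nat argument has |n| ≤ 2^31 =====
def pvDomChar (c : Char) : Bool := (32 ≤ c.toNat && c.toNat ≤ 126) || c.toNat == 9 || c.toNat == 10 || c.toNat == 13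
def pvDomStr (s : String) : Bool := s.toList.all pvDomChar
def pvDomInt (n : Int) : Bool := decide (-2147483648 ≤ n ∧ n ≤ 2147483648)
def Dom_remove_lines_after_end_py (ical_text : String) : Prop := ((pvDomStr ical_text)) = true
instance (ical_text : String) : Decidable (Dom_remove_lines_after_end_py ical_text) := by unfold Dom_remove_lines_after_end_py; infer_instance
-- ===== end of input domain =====

-- B replaces A's backward delete-until-END loop with a forward last-index scan plus a slice; alternative decomposition, same cost.

-- ===== PORT A =====
-- A's backward `for i in range(len(lines)-1,-1,-1)` with `del lines[i]` / `break`: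
-- each step inspects the current last line; a non-END line is deleted (dropLast), an END line breaks.
def pvLoopA (lines : List String) : List String :=
  match h : lines.getLast? with
  | none => lines
  | some l =>
      if ¬ PySem.Str.startswith (PySem.Str.upper l) "END:" then pvLoopA lines.dropLast
      else lines
termination_by lines.length
decreasing_by
  have hne : lines ≠ [] := by intro hnil; rw [hnil] at h; simp at h
  have : 0 < lines.length := List.length_pos_iff.mpr hne
  simp [List.length_dropLast]; omega

def remove_lines_after_end_py (ical_text : String) : String :=
  PySem.Str.join "\n" (pvLoopA (PySem.Str.splitlines ical_text))

-- ===== PORT B =====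
def remove_lines_after_end_py_alt (ical_text : String) : String :=
  let lines := PySem.Str.splitlines ical_text
  let last : Int := (PySem.List.enumerate lines 0).foldl
    (fun acc p => if PySem.Str.startswith (PySem.Str.upper p.2) "END:" then p.1 else acc) (-1)
  PySem.Str.join "\n" (PySem.List.slice lines none (some (last + 1)))

-- ===== PRECONDITION & SPEC =====
def Spec_remove_lines_after_end_py (ical_text : String) (out : String) : Prop := out = remove_lines_after_end_py_alt ical_text
instance (ical_text : String) (out : String) : Decidable (Spec_remove_lines_after_end_py ical_text out) := by unfold Spec_remove_lines_after_end_py; infer_instance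

-- ===== CLAIM (what is proved, stated in full; the proofs are below) =====
def Claim_equal_remove_lines_after_end_py : Prop := ∀ (ical_text : String), Dom_remove_lines_after_end_py ical_text → Spec_remove_lines_after_end_py ical_text (remove_lines_after_end_py ical_text)

-- ===== LEMMAS AND PROOFS =====

def pvLastIdx (lines : List String) : Int :=
  (PySem.List.enumerate lines 0).foldl
    (fun acc p => if PySem.Str.startswith (PySem.Str.upper p.2) "END:" then p.1 else acc) (-1)

theorem pvLastIdx_bounds (lines : List String) :
    -1 ≤ pvLastIdx lines ∧ pvLastIdx lines < lines.length := by
  induction lines using List.reverseRecOn with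
  | nil => simp [pvLastIdx, PySem.List.enumerate]
  | append_singleton xs x ih =>
      unfold pvLastIdx at *
      rw [PySem.List.enumerate_append, List.foldl_append]
      simp only [PySem.List.enumerate_cons, PySem.List.enumerate_nil, List.foldl_cons, List.foldl_nil,
        List.length_append, List.length_singleton]
      split <;> push_cast <;> omega

theorem pvLoopA_nil : pvLoopA [] = [] := by
  unfold pvLoopA; rfl

theorem pvLoopA_append (xs : List String) (x : String) :
    pvLoopA (xs ++ [x]) =
      if PySem.Str.startswith (PySem.Str.upper x) "END:" then xs ++ [x] else pvLoopA xs := by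
  rw [pvLoopA]
  have hl : (xs ++ [x]).getLast? = some x := by simp
  split
  · next h => rw [hl] at h; cases h
  · next l h =>
      rw [hl] at h
      injection h with h
      subst h
      rw [List.dropLast_concat]
      by_cases hp : PySem.Chars.startswith (PySem.Chars.upper x.toList) ['E', 'N', 'D', ':'] = true <;>
        simp [hp]

theorem pvLoopA_eq_take (lines : List String) :
    pvLoopA lines = lines.take (pvLastIdx lines + 1).toNat := by
  induction lines using List.reverseRecOn with
  | nil => simp [pvLoopA_nil]
  | append_singleton xs x ih =>
      have hstep : pvLastIdx (xs ++ [x]) =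
          if PySem.Str.startswith (PySem.Str.upper x) "END:" then (xs.length : Int)
          else pvLastIdx xs := by
        unfold pvLastIdx
        rw [PySem.List.enumerate_append, List.foldl_append]
        simp [PySem.List.enumerate_cons]
      rw [pvLoopA_append, hstep]
      by_cases hp : PySem.Str.startswith (PySem.Str.upper x) "END:" = true
      · simp only [hp, if_true]
        have : ((xs.length : Int) + 1).toNat = xs.length + 1 := by omega
        rw [this, List.take_of_length_le (by simp)]
      · simp only [hp, if_false, ih, Bool.false_eq_true]
        have hb := pvLastIdx_bounds xs
        rw [List.take_append_of_le_length (by omega)]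

theorem remove_lines_after_end_py_spec : Claim_equal_remove_lines_after_end_py := by
  intro s _
  unfold Spec_remove_lines_after_end_py remove_lines_after_end_py remove_lines_after_end_py_alt
  dsimp only
  rw [pvLoopA_eq_take]
  unfold pvLastIdx
  rw [PySem.List.slice_to]
  have hb := pvLastIdx_bounds (PySem.Str.splitlines s)
  unfold pvLastIdx at hb
  omega
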